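-- pv_equiv track=rewrite | github.com/mbmvelander/weaving | colour_gradient.py | fill_remaining
-- ===== SOURCE A (Python) =====
-- def fill_remaining(placement_in, colour_count, n_threads_per_colour):
--     # If we have used up the threads for the colour closest
--     # to the empty spot(s), then it'll be unlikely we fill
--     # them. Just use up the remaining threads if it comes
--     # to that, using colour order to place "original" colour
--     placement = placement_in
--     while sum(x is None for x in placement) > 0:
--         for c in range(len(colour_count)):
--             colour_char = chr(65 + c)
--             while colour_count[c] < n_threads_per_colour[c]:
--                 for p in range(len(placement)):
--                     if placement[p] is None:
--                         placement[p] = colour_char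
--                         colour_count[c] += 1
--                         break
--     return placement
-- ===== SOURCE B (Python) =====
-- def fill_remaining(placement_in, colour_count, n_threads_per_colour):
--     # Single pass over the placement with a colour pointer: each None slot
--     # takes the first colour that still has capacity (same fill order as A,
--     # without rescanning the placement for every thread).
--     c = 0
--     n_colours = len(colour_count)
--     for p, v in enumerate(placement_in):
--         if v is None:
--             while c < n_colours and colour_count[c] >= n_threads_per_colour[c]:
--                 c += 1
--             if c == n_colours:
--                 break
--             placement_in[p] = chr(65 + c)
--             colour_count[c] += 1
--     return placement_in
-- ===== Notes on version B (the rewrite author's own statement) =====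
-- stated objective: alternative
-- what changed: Instead of re-scanning the whole placement from the start for every single thread inside three nested loops, B walks the placement once with a colour pointer that only moves forward, assigning each None slot the first colour with remaining capacity (intended as asymptotically cheaper, but a timing run could not confirm a ratio).
import Mathlib
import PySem

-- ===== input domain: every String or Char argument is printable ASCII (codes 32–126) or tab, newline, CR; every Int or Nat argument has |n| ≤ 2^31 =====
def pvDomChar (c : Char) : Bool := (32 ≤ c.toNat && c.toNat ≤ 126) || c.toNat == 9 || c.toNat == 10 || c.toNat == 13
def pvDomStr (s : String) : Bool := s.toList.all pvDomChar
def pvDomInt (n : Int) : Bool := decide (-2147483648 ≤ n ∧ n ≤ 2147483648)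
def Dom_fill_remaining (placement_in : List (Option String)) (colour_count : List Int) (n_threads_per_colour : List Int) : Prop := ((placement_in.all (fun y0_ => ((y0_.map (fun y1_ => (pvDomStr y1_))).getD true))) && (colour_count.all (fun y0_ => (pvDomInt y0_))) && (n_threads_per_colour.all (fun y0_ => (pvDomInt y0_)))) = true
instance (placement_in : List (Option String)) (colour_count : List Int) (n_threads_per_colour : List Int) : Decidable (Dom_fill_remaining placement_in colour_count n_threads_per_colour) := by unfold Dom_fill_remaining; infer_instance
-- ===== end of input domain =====

-- B is a single forward pass with a colour pointer instead of A's nested rescans.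
-- Equivalence is about the RETURN value only: the Python A (and B) mutate
-- placement_in and colour_count in place; the ports are pure.

-- ===== PORT A =====

-- 'for p in range(len(placement)): if placement[p] is None: placement[p] = ch; break'
-- (returns none when no None slot exists, i.e. the break never fires)
def aFillFirst (pl : List (Option String)) (ch : String) : Option (List (Option String)) :=
  match pl with
  | [] => none
  | none :: rest => some (some ch :: rest)
  | some v :: rest => (aFillFirst rest ch).map (fun r => some v :: r)

-- 'while colour_count[c] < n_threads_per_colour[c]: …' — fuelled; when no None slot
-- remains the Python loops forever, the port stops (such inputs are outside Pre_).
def aInner (fuel : Nat) (pl : List (Option String)) (cnt n : Int) (ch : String) :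
    List (Option String) × Int :=
  match fuel with
  | 0 => (pl, cnt)
  | f + 1 =>
    if cnt < n then
      match aFillFirst pl ch with
      | some pl' => aInner f pl' (cnt + 1) n ch
      | none => (pl, cnt)  -- Python diverges here; totality guard, outside Pre_
    else (pl, cnt)

-- 'for c in range(len(colour_count)): …'; colour_count[c] is in range by construction
-- of the range, so getD is exact there; n_threads_per_colour[c] may raise IndexError
-- in Python — pyGet? = none, where the port stops (outside Pre_).
def aFor (cs : List Nat) (pl : List (Option String)) (cc nt : List Int) :
    List (Option String) × List Int :=
  match cs with
  | [] => (pl, cc)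
  | c :: rest =>
    match PySem.List.pyGet? nt (c : Int) with
    | none => (pl, cc)  -- Python raises IndexError here; outside Pre_
    | some n =>
      let r := aInner (pl.length + 1) pl (cc.getD c 0) n (String.ofList [Char.ofNat (65 + c)])
      aFor rest r.1 (cc.set c r.2) nt

-- 'while sum(x is None for x in placement) > 0: …' — fuelled; inside Pre_ one pass
-- zeroes the count, so countNone+1 fuel is exact there.
def aOuter (fuel : Nat) (pl : List (Option String)) (cc nt : List Int) : List (Option String) :=
  match fuel with
  | 0 => pl
  | f + 1 =>
    if 0 < pl.countP (fun x => x.isNone) then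
      let r := aFor (List.range cc.length) pl cc nt
      aOuter f r.1 r.2 nt
    else pl

def fill_remaining (placement_in : List (Option String)) (colour_count : List Int) (n_threads_per_colour : List Int) : List (Option String) :=
  aOuter (placement_in.countP (fun x => x.isNone) + 1) placement_in colour_count n_threads_per_colour

-- ===== PORT B =====

-- 'while c < n_colours and colour_count[c] >= n_threads_per_colour[c]: c += 1'
-- (nt index is in range whenever read, inside Pre_)
def bAdv (cc nt : List Int) (c : Nat) : Nat :=
  if c < cc.length then
    if nt.getD c 0 ≤ cc.getD c 0 then bAdv cc nt (c + 1) else c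
  else c
termination_by cc.length - c

-- 'for p, v in enumerate(placement_in): …' single pass carrying the pointer c
def bGo : List (Option String) → Nat → List Int → List Int → List (Option String)
  | [], _, _, _ => []
  | some v :: rest, c, cc, nt => some v :: bGo rest c cc nt
  | none :: rest, c, cc, nt =>
    let c' := bAdv cc nt c
    if c' < cc.length then
      some (String.ofList [Char.ofNat (65 + c')]) :: bGo rest c' (cc.set c' (cc.getD c' 0 + 1)) nt
    else none :: rest  -- 'break': the rest is returned unchanged

def fill_remaining_alt (placement_in : List (Option String)) (colour_count : List Int) (n_threads_per_colour : List Int) : List (Option String) :=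
  bGo placement_in 0 colour_count n_threads_per_colour

-- ===== PRECONDITION & SPEC =====
-- Pre_ admits exactly the inputs where Python A returns: either no None slot
-- (immediate return), or colour_count is no longer than n_threads_per_colour
-- (else IndexError) and the number of None slots equals the total remaining
-- capacity Σ max(0, n_threads[c]-count[c]) (if fewer, the inner while loops
-- forever; if more, the outer while loops forever).
def Pre_fill_remaining (placement_in : List (Option String)) (colour_count : List Int) (n_threads_per_colour : List Int) : Prop :=
  placement_in.countP (fun x => x.isNone) = 0 ∨
  (colour_count.length ≤ n_threads_per_colour.length ∧
   placement_in.countP (fun x => x.isNone) =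
     ((List.range colour_count.length).map
       (fun c => (n_threads_per_colour.getD c 0 - colour_count.getD c 0).toNat)).sum)

instance (placement_in : List (Option String)) (colour_count : List Int) (n_threads_per_colour : List Int) : Decidable (Pre_fill_remaining placement_in colour_count n_threads_per_colour) := by unfold Pre_fill_remaining; infer_instance

def pvWitness_fill_remaining : List (Option String) × List Int × List Int :=
  ([none, none, some "X", none], [0, 1], [2, 2])

def Spec_fill_remaining (placement_in : List (Option String)) (colour_count : List Int) (n_threads_per_colour : List Int) (out : List (Option String)) : Prop := out = fill_remaining_alt placement_in colour_count n_threads_per_colour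
instance (placement_in : List (Option String)) (colour_count : List Int) (n_threads_per_colour : List Int) (out : List (Option String)) : Decidable (Spec_fill_remaining placement_in colour_count n_threads_per_colour out) := by unfold Spec_fill_remaining; infer_instance

-- ===== CLAIM (what is proved, stated in full; the proofs are below) =====
def Claim_equal_fill_remaining : Prop := ∀ (placement_in : List (Option String)) (colour_count : List Int) (n_threads_per_colour : List Int), Dom_fill_remaining placement_in colour_count n_threads_per_colour → Pre_fill_remaining placement_in colour_count n_threads_per_colour → Spec_fill_remaining placement_in colour_count n_threads_per_colour (fill_remaining placement_in colour_count n_threads_per_colour)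

-- ===== LEMMAS AND PROOFS =====

-- the colour string both programs assign at colour index c
def chrS (c : Nat) : String := String.ofList [Char.ofNat (65 + c)]

-- the sequence of colour strings still to be handed out from colour c onwards
def streamFrom (cc nt : List Int) (c : Nat) : List String :=
  if c < cc.length then
    List.replicate (nt.getD c 0 - cc.getD c 0).toNat (chrS c) ++ streamFrom cc nt (c + 1)
  else []
termination_by cc.length - c

-- replace successive None slots by successive stream colours; when the stream is
-- exhausted the rest of the list is returned unchanged
def fillStream : List (Option String) → List String → List (Option String)
  | [], _ => []
  | some v :: rest, s => some v :: fillStream rest s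
  | none :: rest, [] => none :: rest
  | none :: rest, ch :: s => some ch :: fillStream rest s

theorem fillStream_nil (pl : List (Option String)) : fillStream pl [] = pl := by
  induction pl with
  | nil => rfl
  | cons x rest ih => cases x <;> simp [fillStream, ih]

theorem fillStream_noNone (pl : List (Option String)) (s : List String)
    (h : pl.countP (fun x => x.isNone) = 0) : fillStream pl s = pl := by
  induction pl generalizing s with
  | nil => rfl
  | cons x rest ih =>
    cases x with
    | none => simp at h
    | some v =>
      simp only [List.countP_cons] at h
      simp [fillStream, ih _ (by simpa using h)]

theorem countP_fillStream (pl : List (Option String)) (s : List String)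
    (h : s.length ≤ pl.countP (fun x => x.isNone)) :
    (fillStream pl s).countP (fun x => x.isNone) = pl.countP (fun x => x.isNone) - s.length := by
  induction pl generalizing s with
  | nil => simp [fillStream]
  | cons x rest ih =>
    cases x with
    | some v =>
      have h' : s.length ≤ rest.countP (fun x => x.isNone) := by simp at h; omega
      simpa [fillStream] using ih s h'
    | none =>
      cases s with
      | nil => simp [fillStream]
      | cons ch s' =>
        have h' : s'.length ≤ rest.countP (fun x => x.isNone) := by simp at h; omega
        have hrec := ih s' h'
        simp [fillStream, hrec]

theorem fillStream_append (pl : List (Option String)) (s t : List String)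
    (h : s.length ≤ pl.countP (fun x => x.isNone)) :
    fillStream pl (s ++ t) = fillStream (fillStream pl s) t := by
  induction pl generalizing s t with
  | nil => simp [fillStream]
  | cons x rest ih =>
    cases x with
    | some v =>
      have h' : s.length ≤ rest.countP (fun x => x.isNone) := by simp at h; omega
      simp [fillStream, ih s t h']
    | none =>
      cases s with
      | nil => simp [fillStream_nil]
      | cons ch s' =>
        have h' : s'.length ≤ rest.countP (fun x => x.isNone) := by simp at h; omega
        simp [fillStream, ih s' t h']

-- ===== A-side lemmas =====

theorem aFillFirst_eq (pl : List (Option String)) (ch : String)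
    (h : 0 < pl.countP (fun x => x.isNone)) :
    aFillFirst pl ch = some (fillStream pl [ch]) := by
  induction pl with
  | nil => simp at h
  | cons x rest ih =>
    cases x with
    | none => simp [aFillFirst, fillStream, fillStream_nil]
    | some v =>
      simp only [List.countP_cons, Option.isNone_some] at h
      simp [aFillFirst, fillStream, ih (by simpa using h)]

theorem aInner_eq (ch : String) (n : Int) :
    ∀ (fuel : Nat) (pl : List (Option String)) (cnt : Int),
    (n - cnt).toNat < fuel → (n - cnt).toNat ≤ pl.countP (fun x => x.isNone) →
    aInner fuel pl cnt n ch =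
      (fillStream pl (List.replicate (n - cnt).toNat ch), cnt + ((n - cnt).toNat : Int)) := by
  intro fuel
  induction fuel with
  | zero => intro pl cnt hf _; omega
  | succ f ih =>
    intro pl cnt hf hc
    by_cases hlt : cnt < n
    · have hk : 0 < (n - cnt).toNat := by omega
      have h0 : 0 < pl.countP (fun x => x.isNone) := by omega
      have hrep : List.replicate (n - cnt).toNat ch
          = [ch] ++ List.replicate ((n - cnt).toNat - 1) ch := by
        cases hkk : (n - cnt).toNat with
        | zero => omega
        | succ m => simp [List.replicate_succ]
      have hone : (1 : Nat) ≤ pl.countP (fun x => x.isNone) := h0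
      have hcount : (fillStream pl [ch]).countP (fun x => x.isNone)
          = pl.countP (fun x => x.isNone) - 1 := by
        simpa using countP_fillStream pl [ch] (by simpa using hone)
      have hk1 : (n - (cnt + 1)).toNat = (n - cnt).toNat - 1 := by omega
      have := ih (fillStream pl [ch]) (cnt + 1) (by omega)
        (by rw [hcount, hk1]; omega)
      simp only [aInner, if_pos hlt, aFillFirst_eq pl ch h0, this, hk1]
      have h1 : fillStream pl (List.replicate (n - cnt).toNat ch)
          = fillStream (fillStream pl [ch]) (List.replicate ((n - cnt).toNat - 1) ch) := by
        rw [hrep, fillStream_append pl [ch] _ (by simpa using hone)]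
      have h2 : cnt + 1 + (((n - cnt).toNat - 1 : Nat) : Int)
          = cnt + ((n - cnt).toNat : Int) := by omega
      rw [h1, h2]
    · have hk : (n - cnt).toNat = 0 := by omega
      simp [aInner, if_neg hlt, hk, fillStream_nil]

theorem streamFrom_stop (cc nt : List Int) (c : Nat) (h : ¬ c < cc.length) :
    streamFrom cc nt c = [] := by
  rw [streamFrom]; simp [h]

theorem streamFrom_eq_flatMap (cc nt : List Int) :
    ∀ (m c : Nat), cc.length = c + m →
    streamFrom cc nt c = (List.range' c m).flatMap
      (fun i => List.replicate (nt.getD i 0 - cc.getD i 0).toNat (chrS i)) := by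
  intro m
  induction m with
  | zero => intro c h; simp [streamFrom_stop cc nt c (by omega)]
  | succ m ih =>
    intro c h
    rw [streamFrom, if_pos (by omega), List.range'_succ]
    simp [List.flatMap_cons, ih (c + 1) (by omega)]

theorem getD_set_ne (l : List Int) (i j : Nat) (x : Int) (h : i ≠ j) :
    (l.set i x).getD j 0 = l.getD j 0 := by
  simp [List.getD, List.getElem?_set_ne h]

theorem getD_set_self (l : List Int) (i : Nat) (x : Int) (h : i < l.length) :
    (l.set i x).getD i 0 = x := by
  simp [List.getD, h]

theorem streamFrom_set_lt (cc nt : List Int) (i c : Nat) (x : Int) (h : i < c) :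
    streamFrom (cc.set i x) nt c = streamFrom cc nt c := by
  by_cases hc : c ≤ cc.length
  · have h1 := streamFrom_eq_flatMap (cc.set i x) nt (cc.length - c) c (by simp; omega)
    have h2 := streamFrom_eq_flatMap cc nt (cc.length - c) c (by omega)
    rw [h1, h2]
    apply List.flatMap_congr
    intro j hj
    have hij : i ≠ j := by simp [List.mem_range'] at hj; omega
    rw [getD_set_ne cc i j x hij]
  · rw [streamFrom_stop _ _ _ (by simp; omega), streamFrom_stop _ _ _ (by omega)]

theorem length_streamFrom (cc nt : List Int) (m c : Nat) (h : cc.length = c + m) :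
    (streamFrom cc nt c).length =
      ((List.range' c m).map (fun i => (nt.getD i 0 - cc.getD i 0).toNat)).sum := by
  rw [streamFrom_eq_flatMap cc nt m c h]
  simp [List.length_flatMap]

theorem countNone_le_length (pl : List (Option String)) :
    pl.countP (fun x => x.isNone) ≤ pl.length := List.countP_le_length

theorem aFor_eq (nt : List Int) :
    ∀ (m c : Nat) (pl : List (Option String)) (cc : List Int),
    cc.length = c + m → cc.length ≤ nt.length →
    pl.countP (fun x => x.isNone) = (streamFrom cc nt c).length →
    (aFor (List.range' c m) pl cc nt).1 = fillStream pl (streamFrom cc nt c) := by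
  intro m
  induction m with
  | zero =>
    intro c pl cc hlen _ _
    simp [aFor, streamFrom_stop cc nt c (by omega), fillStream_nil]
  | succ m ih =>
    intro c pl cc hlen hle hcnt
    have hclen : c < cc.length := by omega
    have hcn : c < nt.length := by omega
    have hget : PySem.List.pyGet? nt (c : Int) = some (nt.getD c 0) := by
      rw [PySem.List.pyGet?_natCast]
      simp [List.getD, List.getElem?_eq_getElem hcn]
    have hstream : streamFrom cc nt c
        = List.replicate (nt.getD c 0 - cc.getD c 0).toNat (String.ofList [Char.ofNat (65 + c)])
          ++ streamFrom cc nt (c + 1) := by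
      rw [streamFrom, if_pos hclen]; rfl
    have hlen2 : (streamFrom cc nt c).length
        = (nt.getD c 0 - cc.getD c 0).toNat + (streamFrom cc nt (c + 1)).length := by
      simp [hstream]
    have hkle : (nt.getD c 0 - cc.getD c 0).toNat ≤ pl.countP (fun x => x.isNone) := by omega
    have hfuel : (nt.getD c 0 - cc.getD c 0).toNat ≤ pl.length :=
      le_trans hkle (countNone_le_length pl)
    have hinner := aInner_eq (String.ofList [Char.ofNat (65 + c)]) (nt.getD c 0)
      (pl.length + 1) pl (cc.getD c 0) (by omega) hkle
    have hfold : (aFor (c :: List.range' (c + 1) m) pl cc nt).1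
        = (aFor (List.range' (c + 1) m)
            (fillStream pl (List.replicate (nt.getD c 0 - cc.getD c 0).toNat
              (String.ofList [Char.ofNat (65 + c)])))
            (cc.set c (cc.getD c 0 + ((nt.getD c 0 - cc.getD c 0).toNat : Int))) nt).1 := by
      simp only [aFor, hget]
      rw [hinner]
    have hset1 : streamFrom (cc.set c (cc.getD c 0 + ((nt.getD c 0 - cc.getD c 0).toNat : Int))) nt (c + 1)
        = streamFrom cc nt (c + 1) :=
      streamFrom_set_lt cc nt c (c + 1) _ (by omega)
    have hcnt' : (fillStream pl (List.replicate (nt.getD c 0 - cc.getD c 0).toNat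
          (String.ofList [Char.ofNat (65 + c)]))).countP (fun x => x.isNone)
        = (streamFrom (cc.set c (cc.getD c 0 + ((nt.getD c 0 - cc.getD c 0).toNat : Int))) nt (c + 1)).length := by
      rw [hset1]
      have hcfs := countP_fillStream pl (List.replicate (nt.getD c 0 - cc.getD c 0).toNat
        (String.ofList [Char.ofNat (65 + c)])) (by rw [List.length_replicate]; exact hkle)
      rw [hcfs, List.length_replicate]
      omega
    have hrec := ih (c + 1)
      (fillStream pl (List.replicate (nt.getD c 0 - cc.getD c 0).toNat
        (String.ofList [Char.ofNat (65 + c)])))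
      (cc.set c (cc.getD c 0 + ((nt.getD c 0 - cc.getD c 0).toNat : Int)))
      (by rw [List.length_set]; omega) (by rw [List.length_set]; omega) hcnt'
    rw [List.range'_succ, hfold, hrec, hset1, hstream,
      fillStream_append pl _ _ (by simpa using hkle)]

-- ===== B-side lemmas =====

theorem bAdv_cap (cc nt : List Int) : ∀ c, bAdv cc nt c < cc.length →
    cc.getD (bAdv cc nt c) 0 < nt.getD (bAdv cc nt c) 0 := by
  intro c
  fun_induction bAdv cc nt c with
  | case1 c h1 h2 ih => exact ih
  | case2 c h1 h2 => intro _; omega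
  | case3 c h => intro h'; omega

theorem bAdv_stream (cc nt : List Int) : ∀ c,
    streamFrom cc nt (bAdv cc nt c) = streamFrom cc nt c := by
  intro c
  fun_induction bAdv cc nt c with
  | case1 c h1 h2 ih =>
    rw [ih]
    conv_rhs => rw [streamFrom]
    rw [if_pos h1, show (nt.getD c 0 - cc.getD c 0).toNat = 0 by omega]
    simp
  | case2 c h1 h2 => rfl
  | case3 c h => rfl

theorem bGo_eq (nt : List Int) :
    ∀ (pl : List (Option String)) (c : Nat) (cc : List Int),
    bGo pl c cc nt = fillStream pl (streamFrom cc nt c) := by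
  intro pl
  induction pl with
  | nil => intro c cc; simp [bGo, fillStream]
  | cons x rest ih =>
    intro c cc
    cases x with
    | some v => cases h : streamFrom cc nt c <;> simp [bGo, fillStream, ih, h]
    | none =>
      simp only [bGo]
      have hstreamAdv := bAdv_stream cc nt c
      by_cases hc : bAdv cc nt c < cc.length
      · have hcap := bAdv_cap cc nt c hc
        generalize hgen : bAdv cc nt c = c' at hstreamAdv hcap hc ⊢
        have hk : 0 < (nt.getD c' 0 - cc.getD c' 0).toNat := by omega
        have hstream : streamFrom cc nt c
            = String.ofList [Char.ofNat (65 + c')]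
              :: (List.replicate ((nt.getD c' 0 - cc.getD c' 0).toNat - 1)
                    (String.ofList [Char.ofNat (65 + c')]) ++ streamFrom cc nt (c' + 1)) := by
          rw [← hstreamAdv, streamFrom, if_pos hc]
          cases hkk : (nt.getD c' 0 - cc.getD c' 0).toNat with
          | zero => omega
          | succ m => simp [List.replicate_succ, chrS]
        have hset : streamFrom (cc.set c' (cc.getD c' 0 + 1)) nt c'
            = List.replicate ((nt.getD c' 0 - cc.getD c' 0).toNat - 1)
                (String.ofList [Char.ofNat (65 + c')]) ++ streamFrom cc nt (c' + 1) := by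
          rw [streamFrom, if_pos (by simpa using hc),
            streamFrom_set_lt cc nt c' (c' + 1) _ (by omega),
            getD_set_self cc c' _ hc]
          congr 1
          simp [chrS]
          omega
        rw [if_pos hc, hstream, ih c' (cc.set c' (cc.getD c' 0 + 1)), hset]
        simp [fillStream]
      · rw [if_neg hc, ← hstreamAdv, streamFrom_stop cc nt _ hc]
        simp [fillStream]

-- ===== final assembly =====

theorem fill_remaining_spec : Claim_equal_fill_remaining := by
  intro pl cc nt _ hpre
  unfold Spec_fill_remaining fill_remaining fill_remaining_alt
  rw [bGo_eq nt pl 0 cc]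
  rcases hpre with h0 | ⟨hlen, hsum⟩
  · rw [fillStream_noNone pl _ h0]
    simp [aOuter, h0]
  · by_cases h0 : pl.countP (fun x => x.isNone) = 0
    · rw [fillStream_noNone pl _ h0]
      simp [aOuter, h0]
    · have hstreamlen : (streamFrom cc nt 0).length = pl.countP (fun x => x.isNone) := by
        rw [length_streamFrom cc nt cc.length 0 (by omega), hsum, List.range_eq_range']
      obtain ⟨f, hf⟩ : ∃ f, pl.countP (fun x => x.isNone) = f + 1 := by
        refine ⟨pl.countP (fun x => x.isNone) - 1, by omega⟩
      rw [hf]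
      simp only [aOuter, if_pos (by omega : 0 < pl.countP (fun x => x.isNone))]
      have hfor := aFor_eq nt cc.length 0 pl cc (by omega) hlen (by omega)
      rw [List.range_eq_range']
      rw [hfor]
      have hc0 : (fillStream pl (streamFrom cc nt 0)).countP (fun x => x.isNone) = 0 := by
        rw [countP_fillStream pl _ (by omega)]; omega
      obtain ⟨f', hf'⟩ : ∃ f', f + 1 = f' + 1 := ⟨f, rfl⟩
      simp [hc0]

-- ===== VERDICT (by name: the statement is the Claim_ definition above) =====
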